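-- pv_equiv track=rewrite | github.com/Julien-pour/arc_example | 32b_gen3-4/ex2/25d487eb/task.py | transform
-- ===== SOURCE A (Python) =====
-- def transform(grid):
--     rows = len(grid)
--     cols = len(grid[0])
--     result = [row[:] for row in grid]
--     for r in range(rows):
--         for c in range(cols):
--             if grid[r][c] == 1:
--                 for i in range(c + 1, cols):
--                     if grid[r][i] == 0:
--                         result[r][i] = 1
--             elif grid[r][c] == 3:
--                 for i in range(r):
--                     if grid[i][c] == 0:
--                         result[i][c] = 3
--             elif grid[r][c] == 2:
--                 if c == cols // 2:
--                     for i in range(r + 1, rows):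
--                         if grid[i][c] == 0:
--                             result[i][c] = 2
--     return result
-- ===== SOURCE B (Python) =====
-- def transform(grid):
--     rows = len(grid)
--     cols = len(grid[0])
--     mid = cols // 2
--     result = [row[:] for row in grid]
--
--     # Paint each kind of ray in one linear sweep per line, tracking whether a
--     # marker has been seen.  Later sweeps take precedence on contested cells:
--     # 2 (downward, middle column) < 1 (rightward) < 3 (upward).
--     for c in range(cols):
--         seen = False
--         for r in range(rows):
--             if grid[r][c] == 2 and c == mid:
--                 seen = True
--             elif seen and grid[r][c] == 0:
--                 result[r][c] = 2
--
--     for r in range(rows):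
--         seen = False
--         for c in range(cols):
--             if grid[r][c] == 1:
--                 seen = True
--             elif seen and grid[r][c] == 0:
--                 result[r][c] = 1
--
--     for c in range(cols):
--         seen = False
--         for r in range(rows - 1, -1, -1):
--             if grid[r][c] == 3:
--                 seen = True
--             elif seen and grid[r][c] == 0:
--                 result[r][c] = 3
--
--     return result
-- ===== Notes on version B (the rewrite author's own statement) =====
-- stated objective: alternative
-- what changed: B replaces A's per-marker ray painting (each 1/3/2 marker rescans the rest of its row/column) by one linear seen-a-marker sweep per line, applied in priority order (2-pass, then 1-pass, then 3-pass), so no inner rescan per marker is needed.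
import Mathlib
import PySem

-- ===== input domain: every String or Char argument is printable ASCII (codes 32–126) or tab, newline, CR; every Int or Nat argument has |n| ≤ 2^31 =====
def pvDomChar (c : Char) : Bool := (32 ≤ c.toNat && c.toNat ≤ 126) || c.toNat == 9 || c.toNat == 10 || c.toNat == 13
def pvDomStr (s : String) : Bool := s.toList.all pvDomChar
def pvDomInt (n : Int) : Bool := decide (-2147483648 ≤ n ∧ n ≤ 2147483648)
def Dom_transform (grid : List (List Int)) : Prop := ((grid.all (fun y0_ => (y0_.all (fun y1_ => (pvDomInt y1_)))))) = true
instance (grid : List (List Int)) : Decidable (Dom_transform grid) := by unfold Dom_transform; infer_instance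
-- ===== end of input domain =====

-- B replaces A's per-marker ray painting (each marker rescans its row/column) by one linear
-- seen-a-marker sweep per line, done in priority order (2-pass, then 1-pass, then 3-pass).
-- Neither program mutates its argument (both copy the grid first).

-- ===== PORT A =====
-- grid[r][c] (always in range where either port evaluates it under Pre_)
def gA (g : List (List Int)) (i j : Nat) : Int := (g.getD i []).getD j 0

-- result[i][j] = v  (in-place assignment on the copied grid)
def setC (g : List (List Int)) (i j : Nat) (v : Int) : List (List Int) :=
  g.set i ((g.getD i []).set j v)

def transform (grid : List (List Int)) : List (List Int) :=
  let rows := grid.length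
  let cols := (grid.getD 0 []).length
  (List.range rows).foldl (fun result r =>
    (List.range cols).foldl (fun result c =>
      if gA grid r c = 1 then
        (List.range' (c+1) (cols - (c+1))).foldl
          (fun result i => if gA grid r i = 0 then setC result r i 1 else result) result
      else if gA grid r c = 3 then
        (List.range r).foldl
          (fun result i => if gA grid i c = 0 then setC result i c 3 else result) result
      else if gA grid r c = 2 then
        if c = cols / 2 then
          (List.range' (r+1) (rows - (r+1))).foldl
            (fun result i => if gA grid i c = 0 then setC result i c 2 else result) result
        else result
      else result) result) grid

-- ===== PORT B =====
-- grid[r][c] as read by B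
def gB (g : List (List Int)) (i j : Nat) : Int := (g.getD i []).getD j 0

-- result[i][j] = v
def setB (g : List (List Int)) (i j : Nat) (v : Int) : List (List Int) :=
  g.set i ((g.getD i []).set j v)

-- three seen-a-marker sweeps; each inner loop carries the pair (result, seen).
-- range(rows-1,-1,-1) is ported as (List.range rows).reverse.
def transform_alt (grid : List (List Int)) : List (List Int) :=
  let rows := grid.length
  let cols := (grid.getD 0 []).length
  let mid := cols / 2
  let result := grid
  let result := (List.range cols).foldl (fun result c =>
    ((List.range rows).foldl (fun (st : List (List Int) × Bool) r =>
      if gB grid r c = 2 ∧ c = mid then (st.1, true)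
      else if st.2 = true ∧ gB grid r c = 0 then (setB st.1 r c 2, st.2)
      else st) (result, false)).1) result
  let result := (List.range rows).foldl (fun result r =>
    ((List.range cols).foldl (fun (st : List (List Int) × Bool) c =>
      if gB grid r c = 1 then (st.1, true)
      else if st.2 = true ∧ gB grid r c = 0 then (setB st.1 r c 1, st.2)
      else st) (result, false)).1) result
  (List.range cols).foldl (fun result c =>
    (((List.range rows).reverse).foldl (fun (st : List (List Int) × Bool) r =>
      if gB grid r c = 3 then (st.1, true)
      else if st.2 = true ∧ gB grid r c = 0 then (setB st.1 r c 3, st.2)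
      else st) (result, false)).1) result

-- ===== PRECONDITION & SPEC =====
-- Pre_: exactly the inputs where A returns; on the empty grid and on grids with a row shorter
-- than the first row, A (and B) raise IndexError.
def Pre_transform (grid : List (List Int)) : Prop :=
  grid ≠ [] ∧ ∀ row ∈ grid, (grid.getD 0 []).length ≤ row.length
instance (grid : List (List Int)) : Decidable (Pre_transform grid) := by
  unfold Pre_transform; infer_instance

def pvWitness_transform : List (List Int) := [[0, 1, 0], [2, 0, 0], [0, 3, 0]]

def Spec_transform (grid : List (List Int)) (out : List (List Int)) : Prop := out = transform_alt grid
instance (grid : List (List Int)) (out : List (List Int)) : Decidable (Spec_transform grid out) := by unfold Spec_transform; infer_instance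

-- ===== CLAIM (what is proved, stated in full; the proofs are below) =====
def Claim_equal_transform : Prop := ∀ (grid : List (List Int)), Dom_transform grid → Pre_transform grid → Spec_transform grid (transform grid)

-- ===== LEMMAS AND PROOFS =====

theorem gB_eq_gA : gB = gA := rfl
theorem setB_eq_setC : setB = setC := rfl

-- lexicographic order on cell positions (the order in which A's outer loops visit markers)
def lexlt (p q : Nat × Nat) : Prop := p.1 < q.1 ∨ (p.1 = q.1 ∧ p.2 < q.2)

-- p is a marker position that writes 3 / 1 / 2 into cell (i, j)
def w3 (grid : List (List Int)) (i j : Nat) (p : Nat × Nat) : Bool :=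
  decide (p.2 = j ∧ i < p.1 ∧ gA grid p.1 j = 3)
def w1 (grid : List (List Int)) (cols i j : Nat) (p : Nat × Nat) : Bool :=
  decide (p.1 = i ∧ p.2 < j ∧ j < cols ∧ gA grid i p.2 = 1)
def w2 (grid : List (List Int)) (rows i j : Nat) (p : Nat × Nat) : Bool :=
  decide (p.1 < i ∧ i < rows ∧ p.2 = j ∧ gA grid p.1 j = 2)

-- value of cell (i, j) after the markers in L have been processed (L a lex-sorted prefix)
def V (grid : List (List Int)) (rows cols : Nat) (L : List (Nat × Nat)) (i j : Nat) : Int :=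
  if gA grid i j ≠ 0 then gA grid i j
  else if L.any (w3 grid i j) then 3
  else if L.any (w1 grid cols i j) then 1
  else if j = cols / 2 ∧ L.any (w2 grid rows i j) then 2
  else gA grid i j

-- the body of A's double loop, as a step function over marker positions
def stepA (grid : List (List Int)) (rows cols : Nat)
    (result : List (List Int)) (p : Nat × Nat) : List (List Int) :=
  if gA grid p.1 p.2 = 1 then
    (List.range' (p.2+1) (cols - (p.2+1))).foldl
      (fun result i => if gA grid p.1 i = 0 then setC result p.1 i 1 else result) result
  else if gA grid p.1 p.2 = 3 then
    (List.range p.1).foldl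
      (fun result i => if gA grid i p.2 = 0 then setC result i p.2 3 else result) result
  else if gA grid p.1 p.2 = 2 then
    if p.2 = cols / 2 then
      (List.range' (p.1+1) (rows - (p.1+1))).foldl
        (fun result i => if gA grid i p.2 = 0 then setC result i p.2 2 else result) result
    else result
  else result

def pairs (rows cols : Nat) : List (Nat × Nat) :=
  (List.range rows).flatMap (fun r => (List.range cols).map (fun c => (r, c)))


theorem transform_eq_foldl_pairs (grid : List (List Int)) :
    transform grid
      = (pairs grid.length (grid.getD 0 []).length).foldl
          (stepA grid grid.length (grid.getD 0 []).length) grid := by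
  simp only [transform, pairs, List.foldl_flatMap, List.foldl_map, stepA]

theorem setC_length (g : List (List Int)) (i j : Nat) (v : Int) :
    (setC g i j v).length = g.length := by
  simp [setC]

theorem getD_setC (g : List (List Int)) (i j : Nat) (v : Int) (r : Nat) :
    (setC g i j v).getD r [] =
      if i = r ∧ i < g.length then (g.getD i []).set j v else g.getD r [] := by
  by_cases h : i = r
  · subst h
    by_cases h2 : i < g.length
    · simp [setC, List.getD_eq_getElem?_getD, List.getElem?_set, h2]
    · have : g[i]? = none := List.getElem?_eq_none (by omega)
      simp [setC, List.getD_eq_getElem?_getD, List.getElem?_set, h2, this]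
  · simp [setC, List.getD_eq_getElem?_getD, List.getElem?_set, h]

theorem setC_rowlen (g : List (List Int)) (i j : Nat) (v : Int) (r : Nat) :
    ((setC g i j v).getD r []).length = (g.getD r []).length := by
  rw [getD_setC]
  split_ifs with h
  · obtain ⟨rfl, _⟩ := h
    simp
  · rfl

theorem gA_setC (g : List (List Int)) (i j : Nat) (v : Int) (i' j' : Nat) :
    gA (setC g i j v) i' j' =
      if i = i' ∧ j = j' ∧ i < g.length ∧ j < (g.getD i []).length then v
      else gA g i' j' := by
  unfold gA
  rw [getD_setC]
  by_cases h : i = i' ∧ i < g.length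
  · obtain ⟨rfl, h2⟩ := h
    rw [if_pos ⟨rfl, h2⟩]
    by_cases h3 : j = j'
    · subst h3
      have hg : g.getD i [] = g[i] := List.getD_eq_getElem _ _ h2
      by_cases h4 : j < (g.getD i []).length
      · rw [hg] at h4
        simp [List.getD_eq_getElem?_getD, List.getElem?_set, h4, h2]
      · rw [hg] at h4
        have : (g[i])[j]? = none := List.getElem?_eq_none (by omega)
        simp [List.getD_eq_getElem?_getD, List.getElem?_set, h4, h2, hg, this]
    · simp [List.getD_eq_getElem?_getD, List.getElem?_set, h3]
  · rw [if_neg h]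
    rw [if_neg (by tauto)]

-- shape of g equals shape of grid
def ShapeEq (g grid : List (List Int)) : Prop :=
  g.length = grid.length ∧ ∀ r, (g.getD r []).length = (grid.getD r []).length

theorem shapeEq_refl (g : List (List Int)) : ShapeEq g g := ⟨rfl, fun _ => rfl⟩

theorem shapeEq_trans {a b c : List (List Int)} (h1 : ShapeEq a b) (h2 : ShapeEq b c) :
    ShapeEq a c := ⟨h1.1.trans h2.1, fun r => (h1.2 r).trans (h2.2 r)⟩

theorem shapeEq_setC (g : List (List Int)) (i j : Nat) (v : Int) :
    ShapeEq (setC g i j v) g := ⟨setC_length g i j v, fun r => setC_rowlen g i j v r⟩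

theorem fill_shape (grid : List (List Int)) (v : Int) (pos : Nat → Nat × Nat) :
    ∀ (S : List Nat) (g : List (List Int)),
    ShapeEq (S.foldl (fun acc m =>
        if gA grid (pos m).1 (pos m).2 = 0 then setC acc (pos m).1 (pos m).2 v else acc) g) g := by
  intro S
  induction S with
  | nil => exact fun g => shapeEq_refl g
  | cons m S ih =>
    intro g
    rw [List.foldl_cons]
    refine shapeEq_trans (ih _) ?_
    split_ifs
    · exact shapeEq_setC g (pos m).1 (pos m).2 v
    · exact shapeEq_refl g

theorem fill_gA (grid : List (List Int)) (v : Int) (pos : Nat → Nat × Nat) :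
    ∀ (S : List Nat) (g : List (List Int)),
      (∀ m ∈ S, (pos m).1 < g.length ∧ (pos m).2 < (g.getD (pos m).1 []).length) →
      ∀ i j, gA (S.foldl (fun acc m =>
          if gA grid (pos m).1 (pos m).2 = 0 then setC acc (pos m).1 (pos m).2 v else acc) g) i j
        = if (∃ m ∈ S, pos m = (i, j)) ∧ gA grid i j = 0 then v else gA g i j := by
  intro S
  induction S with
  | nil => intro g _ i j; simp
  | cons m S ih =>
    intro g hin i j
    rw [List.foldl_cons]
    have hm := hin m List.mem_cons_self
    have hsh : ShapeEq (if gA grid (pos m).1 (pos m).2 = 0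
        then setC g (pos m).1 (pos m).2 v else g) g := by
      split_ifs
      · exact shapeEq_setC g (pos m).1 (pos m).2 v
      · exact shapeEq_refl g
    have hin' : ∀ m' ∈ S, (pos m').1 < (if gA grid (pos m).1 (pos m).2 = 0
        then setC g (pos m).1 (pos m).2 v else g).length ∧
        (pos m').2 < ((if gA grid (pos m).1 (pos m).2 = 0
        then setC g (pos m).1 (pos m).2 v else g).getD (pos m').1 []).length := by
      intro m' hm'
      have := hin m' (List.mem_cons_of_mem _ hm')
      rw [hsh.1, hsh.2]
      exact this
    rw [ih _ hin' i j]
    have hg1 : gA (if gA grid (pos m).1 (pos m).2 = 0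
        then setC g (pos m).1 (pos m).2 v else g) i j
        = if pos m = (i, j) ∧ gA grid i j = 0 then v else gA g i j := by
      split_ifs with hc hw hw
      · obtain ⟨he, _⟩ := hw
        rw [gA_setC, if_pos ⟨by rw [he], by rw [he], hm.1, hm.2⟩]
      · rw [gA_setC, if_neg]
        rintro ⟨e1, e2, _, _⟩
        exact hw ⟨Prod.ext e1 e2, by rw [← e2, ← e1]; exact hc⟩
      · obtain ⟨he, h0⟩ := hw
        rw [he] at hc
        exact absurd h0 hc
      · rfl
    rw [hg1]
    by_cases h0 : gA grid i j = 0
    · by_cases hS : ∃ m' ∈ S, pos m' = (i, j)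
      · rw [if_pos ⟨hS, h0⟩, if_pos ⟨⟨hS.choose, List.mem_cons_of_mem _ hS.choose_spec.1,
          hS.choose_spec.2⟩, h0⟩]
      · rw [if_neg fun h => hS h.1]
        by_cases hpm : pos m = (i, j)
        · rw [if_pos ⟨hpm, h0⟩, if_pos ⟨⟨m, List.mem_cons_self, hpm⟩, h0⟩]
        · rw [if_neg (by tauto), if_neg (by
            rintro ⟨⟨m', hm', he⟩, _⟩
            rcases List.mem_cons.1 hm' with rfl | hm'
            · exact hpm he
            · exact hS ⟨m', hm', he⟩)]
    · rw [if_neg (by tauto), if_neg (by tauto), if_neg (by tauto)]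

-- V is unchanged by appending a marker that writes nothing into (i, j)
theorem V_append_none (grid : List (List Int)) (rows cols : Nat)
    (Ldone : List (Nat × Nat)) (p : Nat × Nat) (i j : Nat)
    (h3 : w3 grid i j p = false) (h1 : w1 grid cols i j p = false)
    (h2 : j = cols / 2 → w2 grid rows i j p = false) :
    V grid rows cols (Ldone ++ [p]) i j = V grid rows cols Ldone i j := by
  unfold V
  simp only [List.any_append, List.any_cons, List.any_nil, h3, h1, Bool.or_false]
  by_cases hj : j = cols / 2
  · rw [h2 hj]
    simp only [Bool.or_false]
  · simp [hj]

theorem V_append_w3 (grid : List (List Int)) (rows cols : Nat)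
    (Ldone : List (Nat × Nat)) (p : Nat × Nat) (i j : Nat)
    (h0 : gA grid i j = 0) (hw : w3 grid i j p = true) :
    V grid rows cols (Ldone ++ [p]) i j = 3 := by
  unfold V
  simp [h0, hw]

theorem V_append_w1 (grid : List (List Int)) (rows cols : Nat)
    (Ldone : List (Nat × Nat)) (p : Nat × Nat) (i j : Nat)
    (h0 : gA grid i j = 0) (hw : w1 grid cols i j p = true)
    (hp3 : w3 grid i j p = false)
    (hno3 : ∀ q ∈ Ldone, w3 grid i j q = false) :
    V grid rows cols (Ldone ++ [p]) i j = 1 := by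
  unfold V
  have e3 : Ldone.any (w3 grid i j) = false := List.any_eq_false.2 (by simpa using hno3)
  simp [h0, hw, hp3, e3]

theorem V_append_w2 (grid : List (List Int)) (rows cols : Nat)
    (Ldone : List (Nat × Nat)) (p : Nat × Nat) (i j : Nat)
    (h0 : gA grid i j = 0) (hj : j = cols / 2) (hw : w2 grid rows i j p = true)
    (hp3 : w3 grid i j p = false) (hp1 : w1 grid cols i j p = false)
    (hno3 : ∀ q ∈ Ldone, w3 grid i j q = false)
    (hno1 : ∀ q ∈ Ldone, w1 grid cols i j q = false) :
    V grid rows cols (Ldone ++ [p]) i j = 2 := by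
  unfold V
  have e3 : (Ldone ++ [p]).any (w3 grid i j) = false := by
    simp only [List.any_append, List.any_cons, List.any_nil, hp3, Bool.or_false]
    exact List.any_eq_false.2 (by simpa using hno3)
  have e1 : (Ldone ++ [p]).any (w1 grid cols i j) = false := by
    simp only [List.any_append, List.any_cons, List.any_nil, hp1, Bool.or_false]
    exact List.any_eq_false.2 (by simpa using hno1)
  have e2 : (Ldone ++ [p]).any (w2 grid rows i j) = true := by
    simp [List.any_append, hw]
  rw [h0]
  simp only [e3, e1, e2, ne_eq]
  simp [hj]

theorem V_of_ne0 (grid : List (List Int)) (rows cols : Nat)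
    (L : List (Nat × Nat)) (i j : Nat) (h : gA grid i j ≠ 0) :
    V grid rows cols L i j = gA grid i j := by
  unfold V
  rw [if_pos h]

theorem step_gA (grid : List (List Int)) (rows cols : Nat)
    (hrows : rows = grid.length)
    (hPre : ∀ r, r < grid.length → cols ≤ (grid.getD r []).length)
    (r c : Nat) (hr : r < rows) (hc : c < cols)
    (Ldone : List (Nat × Nat)) (hLd : ∀ q ∈ Ldone, lexlt q (r, c))
    (g : List (List Int)) (hshape : ShapeEq g grid)
    (hinv : ∀ i j, gA g i j = V grid rows cols Ldone i j) :
    (∀ i j, gA (stepA grid rows cols g (r, c)) i j = V grid rows cols (Ldone ++ [(r, c)]) i j)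
      ∧ ShapeEq (stepA grid rows cols g (r, c)) grid := by
  have hglen : g.length = grid.length := hshape.1
  have hrowlen : ∀ r', (g.getD r' []).length = (grid.getD r' []).length := hshape.2
  unfold stepA
  by_cases hv1 : gA grid r c = 1
  · rw [if_pos hv1]
    refine ⟨?_, shapeEq_trans (fill_shape grid 1 (fun m => (r, m)) _ g) hshape⟩
    intro i j
    have hfill := fill_gA grid 1 (fun m => (r, m)) (List.range' (c+1) (cols - (c+1))) g
      (by
        intro m hm
        rw [List.mem_range'_1] at hm
        refine ⟨show r < g.length by omega, show m < (g.getD r []).length from ?_⟩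
        rw [hrowlen r]
        have := hPre r (by omega)
        omega) i j
    simp only at hfill
    rw [hfill, hinv i j]
    by_cases h0 : gA grid i j = 0
    · by_cases hw : i = r ∧ c < j ∧ j < cols
      · rw [if_pos ⟨⟨j, by rw [List.mem_range'_1]; exact ⟨by omega, by omega⟩, by rw [hw.1]⟩, h0⟩]
        rw [V_append_w1 grid rows cols Ldone (r, c) i j h0
          (by
            simp only [w1, decide_eq_true_eq]
            exact ⟨hw.1.symm, hw.2.1, hw.2.2, by rw [hw.1]; exact hv1⟩)
          (by
            have e := hw.1
            simp only [w3, decide_eq_false_iff_not]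
            rintro ⟨-, hiq, -⟩
            omega)
          (by
            intro q hq
            have hlq := hLd q hq
            have e := hw.1
            simp only [w3, decide_eq_false_iff_not]
            rintro ⟨-, hiq, -⟩
            rcases hlq with h | ⟨h, -⟩ <;> omega)]
      · rw [if_neg (by
          rintro ⟨⟨m, hm, he⟩, -⟩
          rw [List.mem_range'_1] at hm
          rw [Prod.mk.injEq] at he
          exact hw ⟨he.1.symm, by omega⟩)]
        rw [V_append_none grid rows cols Ldone (r, c) i j
          (by
            simp only [w3, decide_eq_false_iff_not]
            rintro ⟨e, -, h⟩
            rw [← e, hv1] at h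
            omega)
          (by
            simp only [w1, decide_eq_false_iff_not]
            rintro ⟨e, hcj, hjc, -⟩
            exact hw ⟨e.symm, hcj, hjc⟩)
          (fun _ => by
            simp only [w2, decide_eq_false_iff_not]
            rintro ⟨-, -, e, h⟩
            rw [← e, hv1] at h
            omega)]
    · rw [if_neg (fun hcon => h0 hcon.2),
        V_of_ne0 grid rows cols (Ldone ++ [(r, c)]) i j h0,
        V_of_ne0 grid rows cols Ldone i j h0]
  · by_cases hv3 : gA grid r c = 3
    · rw [if_neg hv1, if_pos hv3]
      refine ⟨?_, shapeEq_trans (fill_shape grid 3 (fun m => (m, c)) _ g) hshape⟩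
      intro i j
      have hfill := fill_gA grid 3 (fun m => (m, c)) (List.range r) g
        (by
          intro m hm
          rw [List.mem_range] at hm
          refine ⟨show m < g.length by omega, show c < (g.getD m []).length from ?_⟩
          rw [hrowlen m]
          have := hPre m (by omega)
          omega) i j
      simp only at hfill
      rw [hfill, hinv i j]
      by_cases h0 : gA grid i j = 0
      · by_cases hw : j = c ∧ i < r
        · rw [if_pos ⟨⟨i, List.mem_range.2 hw.2, by rw [hw.1]⟩, h0⟩]
          rw [V_append_w3 grid rows cols Ldone (r, c) i j h0
            (by
              simp only [w3, decide_eq_true_eq]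
              exact ⟨hw.1.symm, hw.2, by rw [hw.1]; exact hv3⟩)]
        · rw [if_neg (by
            rintro ⟨⟨m, hm, he⟩, -⟩
            rw [List.mem_range] at hm
            rw [Prod.mk.injEq] at he
            exact hw ⟨he.2.symm, by omega⟩)]
          rw [V_append_none grid rows cols Ldone (r, c) i j
            (by
              simp only [w3, decide_eq_false_iff_not]
              rintro ⟨e, hir, -⟩
              exact hw ⟨e.symm, hir⟩)
            (by
              simp only [w1, decide_eq_false_iff_not]
              rintro ⟨e, -, -, h⟩
              rw [← e, hv3] at h
              omega)
            (fun _ => by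
              simp only [w2, decide_eq_false_iff_not]
              rintro ⟨-, -, e, h⟩
              rw [← e, hv3] at h
              omega)]
      · rw [if_neg (fun hcon => h0 hcon.2),
          V_of_ne0 grid rows cols (Ldone ++ [(r, c)]) i j h0,
          V_of_ne0 grid rows cols Ldone i j h0]
    · by_cases hv2 : gA grid r c = 2
      · by_cases hcm : c = cols / 2
        · rw [if_neg hv1, if_neg hv3, if_pos hv2, if_pos hcm]
          refine ⟨?_, shapeEq_trans (fill_shape grid 2 (fun m => (m, c)) _ g) hshape⟩
          intro i j
          have hfill := fill_gA grid 2 (fun m => (m, c))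
            (List.range' (r+1) (rows - (r+1))) g
            (by
              intro m hm
              rw [List.mem_range'_1] at hm
              refine ⟨show m < g.length by omega,
                show c < (g.getD m []).length from ?_⟩
              rw [hrowlen m]
              have := hPre m (by omega)
              omega) i j
          simp only at hfill
          rw [hfill, hinv i j]
          by_cases h0 : gA grid i j = 0
          · by_cases hw : j = c ∧ r < i ∧ i < rows
            · rw [if_pos ⟨⟨i, by rw [List.mem_range'_1]; exact ⟨by omega, by omega⟩,
                by rw [hw.1]⟩, h0⟩]
              rw [V_append_w2 grid rows cols Ldone (r, c) i j h0 (hw.1.trans hcm)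
                (by
                  simp only [w2, decide_eq_true_eq]
                  exact ⟨hw.2.1, hw.2.2, hw.1.symm, by rw [hw.1]; exact hv2⟩)
                (by
                  have e := hw.2.1
                  simp only [w3, decide_eq_false_iff_not]
                  rintro ⟨-, hir, -⟩
                  omega)
                (by
                  have e := hw.2.1
                  simp only [w1, decide_eq_false_iff_not]
                  rintro ⟨e', -⟩
                  omega)
                (by
                  intro q hq
                  have hlq := hLd q hq
                  have e := hw.2.1
                  simp only [w3, decide_eq_false_iff_not]
                  rintro ⟨-, hiq, -⟩
                  rcases hlq with h | ⟨h, -⟩ <;> omega)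
                (by
                  intro q hq
                  have hlq := hLd q hq
                  have e := hw.2.1
                  simp only [w1, decide_eq_false_iff_not]
                  rintro ⟨e', -⟩
                  rcases hlq with h | ⟨h, -⟩ <;> omega)]
            · rw [if_neg (by
                rintro ⟨⟨m, hm, he⟩, -⟩
                rw [List.mem_range'_1] at hm
                rw [Prod.mk.injEq] at he
                exact hw ⟨he.2.symm, by omega, by omega⟩)]
              rw [V_append_none grid rows cols Ldone (r, c) i j
                (by
                  simp only [w3, decide_eq_false_iff_not]
                  rintro ⟨e, -, h⟩
                  rw [← e, hv2] at h
                  omega)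
                (by
                  simp only [w1, decide_eq_false_iff_not]
                  rintro ⟨e, -, -, h⟩
                  rw [← e, hv2] at h
                  omega)
                (fun _ => by
                  simp only [w2, decide_eq_false_iff_not]
                  rintro ⟨hri, hirows, e, -⟩
                  exact hw ⟨e.symm, hri, hirows⟩)]
          · rw [if_neg (fun hcon => h0 hcon.2),
              V_of_ne0 grid rows cols (Ldone ++ [(r, c)]) i j h0,
              V_of_ne0 grid rows cols Ldone i j h0]
        · rw [if_neg hv1, if_neg hv3, if_pos hv2, if_neg hcm]
          refine ⟨?_, hshape⟩
          intro i j
          rw [hinv i j]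
          rw [V_append_none grid rows cols Ldone (r, c) i j
            (by
              simp only [w3, decide_eq_false_iff_not]
              rintro ⟨e, -, h⟩
              rw [← e, hv2] at h
              omega)
            (by
              simp only [w1, decide_eq_false_iff_not]
              rintro ⟨e, -, -, h⟩
              rw [← e, hv2] at h
              omega)
            (fun hj => by
              simp only [w2, decide_eq_false_iff_not]
              rintro ⟨-, -, e, -⟩
              exact hcm (e.trans hj))]
      · rw [if_neg hv1, if_neg hv3, if_neg hv2]
        refine ⟨?_, hshape⟩
        intro i j
        rw [hinv i j]
        rw [V_append_none grid rows cols Ldone (r, c) i j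
          (by
            simp only [w3, decide_eq_false_iff_not]
            rintro ⟨e, -, h⟩
            rw [← e] at h
            exact hv3 h)
          (by
            simp only [w1, decide_eq_false_iff_not]
            rintro ⟨e, -, -, h⟩
            rw [← e] at h
            exact hv1 h)
          (fun _ => by
            simp only [w2, decide_eq_false_iff_not]
            rintro ⟨-, -, e, h⟩
            rw [← e] at h
            exact hv2 h)]

theorem foldl_step_gA (grid : List (List Int)) (rows cols : Nat)
    (hrows : rows = grid.length)
    (hPre : ∀ r, r < grid.length → cols ≤ (grid.getD r []).length) :
    ∀ (L : List (Nat × Nat)) (Ldone : List (Nat × Nat)) (g : List (List Int)),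
      (∀ p ∈ L, p.1 < rows ∧ p.2 < cols) →
      (∀ p ∈ L, ∀ q ∈ Ldone, lexlt q p) →
      L.Pairwise lexlt →
      ShapeEq g grid →
      (∀ i j, gA g i j = V grid rows cols Ldone i j) →
      (∀ i j, gA (L.foldl (stepA grid rows cols) g) i j = V grid rows cols (Ldone ++ L) i j)
        ∧ ShapeEq (L.foldl (stepA grid rows cols) g) grid := by
  intro L
  induction L with
  | nil =>
    intro Ldone g _ _ _ hsh hinv
    simpa using ⟨hinv, hsh⟩
  | cons p L ih =>
    intro Ldone g hbnd hlex hpw hsh hinv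
    obtain ⟨r, c⟩ := p
    have hb := hbnd (r, c) List.mem_cons_self
    have hstep := step_gA grid rows cols hrows hPre r c hb.1 hb.2 Ldone
      (hlex (r, c) List.mem_cons_self) g hsh hinv
    rw [List.foldl_cons]
    have := ih (Ldone ++ [(r, c)]) (stepA grid rows cols g (r, c))
      (fun p' hp' => hbnd p' (List.mem_cons_of_mem _ hp'))
      (by
        intro p' hp' q hq
        rcases List.mem_append.1 hq with hq | hq
        · exact hlex p' (List.mem_cons_of_mem _ hp') q hq
        · rcases List.mem_singleton.1 hq with rfl
          exact (List.pairwise_cons.1 hpw).1 p' hp')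
      (List.pairwise_cons.1 hpw).2 hstep.2 hstep.1
    simpa [List.append_assoc] using this

theorem mem_pairs (rows cols : Nat) (p : Nat × Nat) :
    p ∈ pairs rows cols ↔ p.1 < rows ∧ p.2 < cols := by
  unfold pairs
  simp only [List.mem_flatMap, List.mem_map, List.mem_range]
  constructor
  · rintro ⟨r, hr, c, hc, rfl⟩
    exact ⟨hr, hc⟩
  · intro ⟨h1, h2⟩
    exact ⟨p.1, h1, p.2, h2, rfl⟩

theorem pairwise_pairs (rows cols : Nat) : (pairs rows cols).Pairwise lexlt := by
  unfold pairs
  have : ∀ (l : List Nat), l.Pairwise (· < ·) →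
      (l.flatMap (fun r => (List.range cols).map (fun c => (r, c)))).Pairwise lexlt := by
    intro l hl
    induction l with
    | nil => simp
    | cons a l ih =>
      rw [List.flatMap_cons, List.pairwise_append]
      obtain ⟨ha, hl'⟩ := List.pairwise_cons.1 hl
      refine ⟨List.Pairwise.map _ (fun x y h => Or.inr ⟨rfl, h⟩) List.pairwise_lt_range,
        ih hl', ?_⟩
      rintro x hx y hy
      obtain ⟨cx, _, rfl⟩ := List.mem_map.1 hx
      obtain ⟨ry, hry, cy, _, rfl⟩ := by
        simpa only [List.mem_flatMap, List.mem_map] using hy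
      exact Or.inl (ha ry hry)
  exact this (List.range rows) List.pairwise_lt_range

theorem V_nil (grid : List (List Int)) (rows cols i j : Nat) :
    V grid rows cols [] i j = gA grid i j := by
  unfold V
  simp

theorem V_pairs_ge (grid : List (List Int)) (rows cols r j : Nat) (hj : cols ≤ j) :
    V grid rows cols (pairs rows cols) r j = gA grid r j := by
  unfold V
  have a3 : (pairs rows cols).any (w3 grid r j) = false := List.any_eq_false.2 (by
    intro p hp
    rw [mem_pairs] at hp
    simp only [w3, decide_eq_true_eq]
    rintro ⟨e, -, -⟩
    omega)
  have a1 : (pairs rows cols).any (w1 grid cols r j) = false := List.any_eq_false.2 (by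
    intro p hp
    simp only [w1, decide_eq_true_eq]
    rintro ⟨-, -, hjc, -⟩
    omega)
  have a2 : (pairs rows cols).any (w2 grid rows r j) = false := List.any_eq_false.2 (by
    intro p hp
    rw [mem_pairs] at hp
    simp only [w2, decide_eq_true_eq]
    rintro ⟨-, -, e, -⟩
    omega)
  simp [a3, a1, a2]

-- V over all marker pairs, written as a pointwise priority formula
set_option maxHeartbeats 1000000 in
theorem V_pairs_cell (grid : List (List Int)) (i j : Nat) :
    V grid grid.length (grid.getD 0 []).length
        (pairs grid.length (grid.getD 0 []).length) i j
      = (if gA grid i j = 0 ∧ j < (grid.getD 0 []).length ∧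
            (∃ m ∈ List.range grid.length, i < m ∧ gA grid m j = 3) then 3
         else if gA grid i j = 0 ∧ i < grid.length ∧ j < (grid.getD 0 []).length ∧
            (∃ c' ∈ List.range (grid.getD 0 []).length, c' < j ∧ gA grid i c' = 1) then 1
         else if gA grid i j = 0 ∧ j < (grid.getD 0 []).length ∧
            j = (grid.getD 0 []).length / 2 ∧
            (∃ m ∈ List.range grid.length, m < i ∧ i < grid.length ∧ gA grid m j = 2) then 2
         else gA grid i j) := by
  set rows := grid.length with hrows
  set cols := (grid.getD 0 []).length with hcols
  have e3 : ((pairs rows cols).any (w3 grid i j) = true)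
      ↔ (j < cols ∧ ∃ m ∈ List.range rows, i < m ∧ gA grid m j = 3) := by
    rw [List.any_eq_true]
    constructor
    · rintro ⟨p, hp, hw⟩
      rw [mem_pairs] at hp
      simp only [w3, decide_eq_true_eq] at hw
      exact ⟨by omega, p.1, List.mem_range.2 hp.1, hw.2.1, hw.2.2⟩
    · rintro ⟨hj, m, hm, him, hv⟩
      rw [List.mem_range] at hm
      exact ⟨(m, j), (mem_pairs _ _ _).2 ⟨hm, hj⟩,
        by simp only [w3]; rw [decide_eq_true_eq]; exact ⟨by trivial, him, hv⟩⟩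
  have e1 : ((pairs rows cols).any (w1 grid cols i j) = true)
      ↔ (i < rows ∧ j < cols ∧ ∃ c' ∈ List.range cols, c' < j ∧ gA grid i c' = 1) := by
    rw [List.any_eq_true]
    constructor
    · rintro ⟨p, hp, hw⟩
      rw [mem_pairs] at hp
      simp only [w1, decide_eq_true_eq] at hw
      refine ⟨by omega, hw.2.2.1, p.2, List.mem_range.2 (by omega), hw.2.1, hw.2.2.2⟩
    · rintro ⟨hi, hj, c', hc', hcj, hv⟩
      exact ⟨(i, c'), (mem_pairs _ _ _).2 ⟨hi, List.mem_range.1 hc'⟩,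
        by simp only [w1]; rw [decide_eq_true_eq]; exact ⟨by trivial, hcj, hj, hv⟩⟩
  have e2 : ((pairs rows cols).any (w2 grid rows i j) = true)
      ↔ (j < cols ∧ ∃ m ∈ List.range rows, m < i ∧ i < rows ∧ gA grid m j = 2) := by
    rw [List.any_eq_true]
    constructor
    · rintro ⟨p, hp, hw⟩
      rw [mem_pairs] at hp
      simp only [w2, decide_eq_true_eq] at hw
      exact ⟨by omega, p.1, List.mem_range.2 (by omega), hw.1, hw.2.1, hw.2.2.2⟩
    · rintro ⟨hj, m, hm, hmi, hi, hv⟩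
      rw [List.mem_range] at hm
      exact ⟨(m, j), (mem_pairs _ _ _).2 ⟨by omega, hj⟩,
        by simp only [w2]; rw [decide_eq_true_eq]; exact ⟨hmi, hi, by trivial, hv⟩⟩
  unfold V
  simp only [e3, e1, e2]
  set E3 := ∃ m ∈ List.range rows, i < m ∧ gA grid m j = 3 with hE3
  set E1 := ∃ c' ∈ List.range cols, c' < j ∧ gA grid i c' = 1 with hE1
  set E2 := ∃ m ∈ List.range rows, m < i ∧ i < rows ∧ gA grid m j = 2 with hE2
  by_cases h0 : gA grid i j = 0
  · rw [if_neg (not_not_intro h0)]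
    by_cases c3 : j < cols ∧ E3
    · rw [if_pos c3, if_pos (show gA grid i j = 0 ∧ j < cols ∧ E3 from ⟨h0, c3⟩)]
    · rw [if_neg c3,
        if_neg (show ¬(gA grid i j = 0 ∧ j < cols ∧ E3) from fun h => c3 h.2)]
      by_cases c1 : i < rows ∧ j < cols ∧ E1
      · rw [if_pos c1,
          if_pos (show gA grid i j = 0 ∧ i < rows ∧ j < cols ∧ E1 from ⟨h0, c1⟩)]
      · rw [if_neg c1,
          if_neg (show ¬(gA grid i j = 0 ∧ i < rows ∧ j < cols ∧ E1) from fun h => c1 h.2)]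
        by_cases c2 : j = cols / 2 ∧ (j < cols ∧ E2)
        · rw [if_pos c2,
            if_pos (show gA grid i j = 0 ∧ j < cols ∧ j = cols / 2 ∧ E2 from
              ⟨h0, c2.2.1, c2.1, c2.2.2⟩)]
        · rw [if_neg c2,
            if_neg (show ¬(gA grid i j = 0 ∧ j < cols ∧ j = cols / 2 ∧ E2) from
              fun h => c2 ⟨h.2.2.1, h.2.1, h.2.2.2⟩)]
  · rw [if_pos h0,
      if_neg (show ¬(gA grid i j = 0 ∧ j < cols ∧ E3) from fun h => h0 h.1),
      if_neg (show ¬(gA grid i j = 0 ∧ i < rows ∧ j < cols ∧ E1) from fun h => h0 h.1),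
      if_neg (show ¬(gA grid i j = 0 ∧ j < cols ∧ j = cols / 2 ∧ E2) from fun h => h0 h.1)]

-- ---------- B-side: generic seen-a-marker sweep ----------

-- one sweep step over scan index m: on a marker set seen; on a zero cell with seen, write v
def sstep (grid : List (List Int)) (mark : Nat → Bool) (pos : Nat → Nat × Nat) (v : Int)
    (st : List (List Int) × Bool) (m : Nat) : List (List Int) × Bool :=
  if mark m = true then (st.1, true)
  else if st.2 = true ∧ gB grid (pos m).1 (pos m).2 = 0 then
    (setB st.1 (pos m).1 (pos m).2 v, st.2)
  else st

theorem sweep_shape (grid : List (List Int)) (mark : Nat → Bool) (pos : Nat → Nat × Nat)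
    (v : Int) : ∀ (S : List Nat) (st : List (List Int) × Bool),
    ShapeEq ((S.foldl (sstep grid mark pos v) st).1) st.1 := by
  intro S
  induction S with
  | nil => intro st; exact shapeEq_refl _
  | cons a S ih =>
    intro st
    rw [List.foldl_cons]
    refine shapeEq_trans (ih _) ?_
    unfold sstep
    split_ifs
    · exact shapeEq_refl _
    · rw [setB_eq_setC]
      exact shapeEq_setC _ _ _ _
    · exact shapeEq_refl _

theorem pair_sublist_range {m' m n : Nat} :
    [m', m].Sublist (List.range n) ↔ m' < m ∧ m < n := by
  constructor
  · intro h
    have hp := (List.pairwise_lt_range (n := n)).sublist h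
    have hm : m ∈ List.range n := h.subset (by simp)
    rw [List.mem_range] at hm
    exact ⟨(List.pairwise_cons.1 hp).1 m (by simp), hm⟩
  · rintro ⟨h1, h2⟩
    have s1 : ([m'] ++ [m]).Sublist (List.range m ++ [m]) :=
      (List.singleton_sublist.2 (List.mem_range.2 h1)).append (List.Sublist.refl [m])
    rw [← List.range_succ] at s1
    exact s1.trans (List.range_sublist.2 h2)

theorem pair_sublist_range_rev {m' m n : Nat} :
    [m', m].Sublist ((List.range n).reverse) ↔ m < m' ∧ m' < n := by
  rw [show [m', m] = ([m, m'] : List Nat).reverse from rfl, List.reverse_sublist,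
    pair_sublist_range]

-- the value of every cell after one full sweep, by induction over the scan list
theorem sweep_gA (grid : List (List Int)) (mark : Nat → Bool) (pos : Nat → Nat × Nat) (v : Int)
    (hmz : ∀ m, mark m = true → gB grid (pos m).1 (pos m).2 ≠ 0) :
    ∀ (S : List Nat) (res : List (List Int)) (seen0 : Bool),
      (∀ m ∈ S, (pos m).1 < res.length ∧ (pos m).2 < (res.getD (pos m).1 []).length) →
      ∀ i j, gA ((S.foldl (sstep grid mark pos v) (res, seen0)).1) i j =
        if gB grid i j = 0 ∧
            ((seen0 = true ∧ ∃ m ∈ S, pos m = (i, j)) ∨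
             (∃ m' ∈ S, ∃ m ∈ S, mark m' = true ∧ pos m = (i, j) ∧ [m', m].Sublist S)) then v
        else gA res i j := by
  intro S
  induction S with
  | nil =>
    intro res seen0 _ i j
    simp
  | cons a S ih =>
    intro res seen0 hbnd i j
    rw [List.foldl_cons]
    have hbnd' : ∀ m ∈ S, (pos m).1 < res.length ∧
        (pos m).2 < (res.getD (pos m).1 []).length :=
      fun m hm => hbnd m (List.mem_cons_of_mem _ hm)
    by_cases hma : mark a = true
    · have hstep : sstep grid mark pos v (res, seen0) a = (res, true) := by
        unfold sstep; rw [if_pos hma]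
      rw [hstep, ih res true hbnd' i j]
      refine if_congr ?_ rfl rfl
      constructor
      · rintro ⟨h0, hrest⟩
        refine ⟨h0, ?_⟩
        have hex : ∃ m ∈ S, pos m = (i, j) := by
          rcases hrest with ⟨-, hex⟩ | ⟨m', -, m, hmS, -, he, -⟩
          · exact hex
          · exact ⟨m, hmS, he⟩
        obtain ⟨m, hm, he⟩ := hex
        exact Or.inr ⟨a, List.mem_cons_self, m, List.mem_cons_of_mem _ hm, hma, he,
          List.Sublist.cons₂ a (List.singleton_sublist.2 hm)⟩
      · rintro ⟨h0, hrest⟩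
        refine ⟨h0, Or.inl ⟨rfl, ?_⟩⟩
        rcases hrest with ⟨-, m, hm, he⟩ | ⟨m', -, m, -, hm', he, hs⟩
        · rcases List.mem_cons.1 hm with rfl | hm
          · have := hmz m hma
            rw [he] at this
            exact absurd h0 this
          · exact ⟨m, hm, he⟩
        · cases hs with
          | cons _ h => exact ⟨m, h.subset (by simp), he⟩
          | cons₂ _ h => exact ⟨m, List.singleton_sublist.1 h, he⟩
    · by_cases hwr : seen0 = true ∧ gB grid (pos a).1 (pos a).2 = 0
      · have hstep : sstep grid mark pos v (res, seen0) a
            = (setB res (pos a).1 (pos a).2 v, seen0) := by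
          unfold sstep; rw [if_neg hma, if_pos hwr]
        obtain ⟨hseen, hz⟩ := hwr
        have hba := hbnd a List.mem_cons_self
        have hbnd'' : ∀ m ∈ S, (pos m).1 < (setB res (pos a).1 (pos a).2 v).length ∧
            (pos m).2 < ((setB res (pos a).1 (pos a).2 v).getD (pos m).1 []).length := by
          intro m hm
          have hb := hbnd' m hm
          rw [setB_eq_setC, setC_length, getD_setC]
          refine ⟨hb.1, ?_⟩
          split_ifs with h
          · rw [List.length_set, h.1]
            exact hb.2
          · exact hb.2
        rw [hstep, ih _ seen0 hbnd'' i j]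
        have hset : gA (setB res (pos a).1 (pos a).2 v) i j
            = if pos a = (i, j) then v else gA res i j := by
          rw [setB_eq_setC, gA_setC]
          by_cases hpa : pos a = (i, j)
          · rw [if_pos (by rw [hpa]; exact ⟨rfl, rfl, by rw [← hpa]; exact hba.1,
              by rw [← hpa]; exact hba.2⟩), if_pos hpa]
          · rw [if_neg (by
              rintro ⟨e1, e2, -, -⟩
              exact hpa (Prod.ext e1 e2)), if_neg hpa]
        by_cases h0 : gB grid i j = 0
        · by_cases hex : ∃ m ∈ S, pos m = (i, j)
          · rw [if_pos ⟨h0, Or.inl ⟨hseen, hex⟩⟩,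
              if_pos ⟨h0, Or.inl ⟨hseen, hex.choose,
                List.mem_cons_of_mem _ hex.choose_spec.1, hex.choose_spec.2⟩⟩]
          · rw [if_neg (by
              rintro ⟨-, ⟨-, hex'⟩ | ⟨m', -, m, hmS, -, he, -⟩⟩
              · exact hex hex'
              · exact hex ⟨m, hmS, he⟩), hset]
            by_cases hpa : pos a = (i, j)
            · rw [if_pos hpa, if_pos ⟨h0, Or.inl ⟨hseen, a, List.mem_cons_self, hpa⟩⟩]
            · rw [if_neg hpa, if_neg (by
                rintro ⟨-, ⟨-, m, hm, he⟩ | ⟨m', -, m, hm, -, he, -⟩⟩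
                · rcases List.mem_cons.1 hm with rfl | hm
                  · exact hpa he
                  · exact hex ⟨m, hm, he⟩
                · rcases List.mem_cons.1 hm with rfl | hm
                  · exact hpa he
                  · exact hex ⟨m, hm, he⟩)]
        · rw [if_neg (fun h => h0 h.1), if_neg (fun h => h0 h.1), hset,
            if_neg (by
              intro hpa
              rw [hpa] at hz
              exact h0 hz)]
      · have hstep : sstep grid mark pos v (res, seen0) a = (res, seen0) := by
          unfold sstep; rw [if_neg hma, if_neg hwr]
        rw [hstep, ih res seen0 hbnd' i j]
        refine if_congr ?_ rfl rfl
        constructor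
        · rintro ⟨h0, hrest⟩
          refine ⟨h0, ?_⟩
          rcases hrest with ⟨hs0, m, hm, he⟩ | ⟨m', hm'S, m, hmS, hm', he, hs⟩
          · exact Or.inl ⟨hs0, m, List.mem_cons_of_mem _ hm, he⟩
          · exact Or.inr ⟨m', List.mem_cons_of_mem _ hm'S, m, List.mem_cons_of_mem _ hmS,
              hm', he, hs.cons a⟩
        · rintro ⟨h0, hrest⟩
          refine ⟨h0, ?_⟩
          rcases hrest with ⟨hs0, m, hm, he⟩ | ⟨m', hm'S, m, hmS, hm', he, hs⟩
          · rcases List.mem_cons.1 hm with rfl | hm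
            · exfalso
              apply hwr
              refine ⟨hs0, ?_⟩
              rw [he]
              exact h0
            · exact Or.inl ⟨hs0, m, hm, he⟩
          · cases hs with
            | cons _ h =>
              exact Or.inr ⟨m', h.subset (by simp), m, h.subset (by simp), hm', he, h⟩
            | cons₂ _ h => exact absurd hm' hma

-- gluing several independent line sweeps
theorem passes_fold (grid : List (List Int)) (v : Int)
    (body : List (List Int) → Nat → List (List Int))
    (Ok : Nat → Prop) (Q : Nat → Nat → Nat → Prop)
    [inst : ∀ c i j, Decidable (Q c i j)]
    (hbody : ∀ res c, Ok c → ShapeEq res grid →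
      (∀ i j, gA (body res c) i j = if Q c i j then v else gA res i j)
        ∧ ShapeEq (body res c) grid) :
    ∀ (C : List Nat) (res : List (List Int)), (∀ c ∈ C, Ok c) → ShapeEq res grid →
      (∀ i j, gA (C.foldl body res) i j = if ∃ c ∈ C, Q c i j then v else gA res i j)
        ∧ ShapeEq (C.foldl body res) grid := by
  intro C
  induction C with
  | nil =>
    intro res _ hsh
    exact ⟨fun i j => by simp, hsh⟩
  | cons c C ih =>
    intro res hOk hsh
    rw [List.foldl_cons]
    obtain ⟨hcell, hsh'⟩ := hbody res c (hOk c List.mem_cons_self) hsh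
    obtain ⟨hcell', hsh''⟩ := ih (body res c)
      (fun c' hc' => hOk c' (List.mem_cons_of_mem _ hc')) hsh'
    refine ⟨fun i j => ?_, hsh''⟩
    rw [hcell' i j, hcell i j]
    by_cases h1 : ∃ c' ∈ C, Q c' i j
    · rw [if_pos h1, if_pos ⟨h1.choose, List.mem_cons_of_mem _ h1.choose_spec.1,
        h1.choose_spec.2⟩]
    · rw [if_neg h1]
      by_cases h2 : Q c i j
      · rw [if_pos h2, if_pos ⟨c, List.mem_cons_self, h2⟩]
      · rw [if_neg h2, if_neg (by
          rintro ⟨c', hc', hq⟩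
          rcases List.mem_cons.1 hc' with rfl | hc'
          · exact h2 hq
          · exact h1 ⟨c', hc', hq⟩)]

-- the three sweep bodies of transform_alt, named for the proofs
def body2 (grid : List (List Int)) (rows mid : Nat)
    (result : List (List Int)) (c : Nat) : List (List Int) :=
  ((List.range rows).foldl
    (sstep grid (fun r => decide (gB grid r c = 2 ∧ c = mid)) (fun r => (r, c)) 2)
    (result, false)).1

def body1 (grid : List (List Int)) (cols : Nat)
    (result : List (List Int)) (r : Nat) : List (List Int) :=
  ((List.range cols).foldl
    (sstep grid (fun c => decide (gB grid r c = 1)) (fun c => (r, c)) 1)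
    (result, false)).1

def body3 (grid : List (List Int)) (rows : Nat)
    (result : List (List Int)) (c : Nat) : List (List Int) :=
  (((List.range rows).reverse).foldl
    (sstep grid (fun r => decide (gB grid r c = 3)) (fun r => (r, c)) 3)
    (result, false)).1

theorem port2_eq (grid : List (List Int)) (c mid : Nat) :
    (fun (st : List (List Int) × Bool) r =>
      if gB grid r c = 2 ∧ c = mid then (st.1, true)
      else if st.2 = true ∧ gB grid r c = 0 then (setB st.1 r c 2, st.2)
      else st)
    = sstep grid (fun r => decide (gB grid r c = 2 ∧ c = mid)) (fun r => (r, c)) 2 := by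
  funext st r
  simp only [sstep, decide_eq_true_eq]

theorem port1_eq (grid : List (List Int)) (r : Nat) :
    (fun (st : List (List Int) × Bool) c =>
      if gB grid r c = 1 then (st.1, true)
      else if st.2 = true ∧ gB grid r c = 0 then (setB st.1 r c 1, st.2)
      else st)
    = sstep grid (fun c => decide (gB grid r c = 1)) (fun c => (r, c)) 1 := by
  funext st c
  simp only [sstep, decide_eq_true_eq]

theorem port3_eq (grid : List (List Int)) (c : Nat) :
    (fun (st : List (List Int) × Bool) r =>
      if gB grid r c = 3 then (st.1, true)
      else if st.2 = true ∧ gB grid r c = 0 then (setB st.1 r c 3, st.2)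
      else st)
    = sstep grid (fun r => decide (gB grid r c = 3)) (fun r => (r, c)) 3 := by
  funext st r
  simp only [sstep, decide_eq_true_eq]

theorem alt_eq_passes (grid : List (List Int)) :
    transform_alt grid
      = (List.range (grid.getD 0 []).length).foldl (body3 grid grid.length)
          ((List.range grid.length).foldl (body1 grid (grid.getD 0 []).length)
            ((List.range (grid.getD 0 []).length).foldl
              (body2 grid grid.length ((grid.getD 0 []).length / 2)) grid)) := by
  simp only [transform_alt, port2_eq, port1_eq, port3_eq]
  rfl

-- per-line cell formulas, from the generic sweep lemma
theorem body2_spec (grid : List (List Int))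
    (hPre : ∀ r, r < grid.length → (grid.getD 0 []).length ≤ (grid.getD r []).length)
    (res : List (List Int)) (c : Nat) (hc : c < (grid.getD 0 []).length)
    (hsh : ShapeEq res grid) :
    (∀ i j, gA (body2 grid grid.length ((grid.getD 0 []).length / 2) res c) i j =
      if gB grid i j = 0 ∧ j = c ∧ j = (grid.getD 0 []).length / 2 ∧
          ∃ m ∈ List.range grid.length, m < i ∧ i < grid.length ∧ gB grid m j = 2
      then 2 else gA res i j)
      ∧ ShapeEq (body2 grid grid.length ((grid.getD 0 []).length / 2) res c) grid := by
  constructor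
  · intro i j
    rw [body2, sweep_gA grid _ _ 2
      (by
        intro m hm
        rw [decide_eq_true_eq] at hm
        simp only
        rw [hm.1]
        omega)
      (List.range grid.length) res false
      (by
        intro m hm
        rw [List.mem_range] at hm
        simp only
        refine ⟨by rw [hsh.1]; exact hm, ?_⟩
        rw [hsh.2]
        have := hPre m hm
        omega) i j]
    refine if_congr ?_ rfl rfl
    constructor
    · rintro ⟨h0, ⟨hf, -⟩ | ⟨m', -, m, -, hm', he, hs⟩⟩
      · exact absurd hf (by simp)
      · rw [pair_sublist_range] at hs
        rw [decide_eq_true_eq] at hm'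
        simp only [Prod.mk.injEq] at he
        refine ⟨h0, he.2.symm, by rw [← he.2]; exact hm'.2,
          m', List.mem_range.2 (by omega), by omega, by omega, ?_⟩
        rw [← he.2]
        exact hm'.1
    · rintro ⟨h0, hjc, hjm, m, hmR, hmi, hi, hv⟩
      refine ⟨h0, Or.inr ⟨m, List.mem_range.2 (by omega), i, List.mem_range.2 hi,
        ?_, by rw [hjc], ?_⟩⟩
      · rw [decide_eq_true_eq]
        exact ⟨by rw [← hjc]; exact hv, by rw [← hjc]; exact hjm⟩
      · rw [pair_sublist_range]
        exact ⟨hmi, hi⟩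
  · rw [body2]
    exact shapeEq_trans (sweep_shape grid _ _ 2 (List.range grid.length) (res, false)) hsh

theorem body1_spec (grid : List (List Int))
    (hPre : ∀ r, r < grid.length → (grid.getD 0 []).length ≤ (grid.getD r []).length)
    (res : List (List Int)) (r : Nat) (hr : r < grid.length)
    (hsh : ShapeEq res grid) :
    (∀ i j, gA (body1 grid (grid.getD 0 []).length res r) i j =
      if gB grid i j = 0 ∧ i = r ∧ j < (grid.getD 0 []).length ∧
          ∃ c' ∈ List.range (grid.getD 0 []).length, c' < j ∧ gB grid i c' = 1
      then 1 else gA res i j)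
      ∧ ShapeEq (body1 grid (grid.getD 0 []).length res r) grid := by
  constructor
  · intro i j
    rw [body1, sweep_gA grid _ _ 1
      (by
        intro m hm
        rw [decide_eq_true_eq] at hm
        simp only
        rw [hm]
        omega)
      (List.range (grid.getD 0 []).length) res false
      (by
        intro m hm
        rw [List.mem_range] at hm
        simp only
        refine ⟨by rw [hsh.1]; exact hr, ?_⟩
        rw [hsh.2]
        have := hPre r hr
        omega) i j]
    refine if_congr ?_ rfl rfl
    constructor
    · rintro ⟨h0, ⟨hf, -⟩ | ⟨m', -, m, -, hm', he, hs⟩⟩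
      · exact absurd hf (by simp)
      · rw [pair_sublist_range] at hs
        rw [decide_eq_true_eq] at hm'
        simp only [Prod.mk.injEq] at he
        refine ⟨h0, he.1.symm, by omega, m', List.mem_range.2 (by omega), by omega, ?_⟩
        rw [he.1] at hm'
        exact hm'
    · rintro ⟨h0, hir, hj, c', hc', hcj, hv⟩
      refine ⟨h0, Or.inr ⟨c', hc', j, List.mem_range.2 hj, ?_, by rw [hir], ?_⟩⟩
      · rw [decide_eq_true_eq]
        rw [← hir]
        exact hv
      · rw [pair_sublist_range]
        exact ⟨hcj, hj⟩
  · rw [body1]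
    exact shapeEq_trans
      (sweep_shape grid _ _ 1 (List.range (grid.getD 0 []).length) (res, false)) hsh

theorem body3_spec (grid : List (List Int))
    (hPre : ∀ r, r < grid.length → (grid.getD 0 []).length ≤ (grid.getD r []).length)
    (res : List (List Int)) (c : Nat) (hc : c < (grid.getD 0 []).length)
    (hsh : ShapeEq res grid) :
    (∀ i j, gA (body3 grid grid.length res c) i j =
      if gB grid i j = 0 ∧ j = c ∧
          ∃ m ∈ List.range grid.length, i < m ∧ gB grid m j = 3
      then 3 else gA res i j)
      ∧ ShapeEq (body3 grid grid.length res c) grid := by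
  constructor
  · intro i j
    rw [body3, sweep_gA grid _ _ 3
      (by
        intro m hm
        rw [decide_eq_true_eq] at hm
        simp only
        rw [hm]
        omega)
      ((List.range grid.length).reverse) res false
      (by
        intro m hm
        rw [List.mem_reverse, List.mem_range] at hm
        simp only
        refine ⟨by rw [hsh.1]; exact hm, ?_⟩
        rw [hsh.2]
        have := hPre m hm
        omega) i j]
    refine if_congr ?_ rfl rfl
    constructor
    · rintro ⟨h0, ⟨hf, -⟩ | ⟨m', -, m, -, hm', he, hs⟩⟩
      · exact absurd hf (by simp)
      · rw [pair_sublist_range_rev] at hs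
        rw [decide_eq_true_eq] at hm'
        simp only [Prod.mk.injEq] at he
        refine ⟨h0, he.2.symm, m', List.mem_range.2 (by omega), by omega, ?_⟩
        rw [← he.2]
        exact hm'
    · rintro ⟨h0, hjc, m, hmR, him, hv⟩
      rw [List.mem_range] at hmR
      refine ⟨h0, Or.inr ⟨m, List.mem_reverse.2 (List.mem_range.2 hmR),
        i, List.mem_reverse.2 (List.mem_range.2 (by omega)), ?_, by rw [hjc], ?_⟩⟩
      · rw [decide_eq_true_eq]
        rw [← hjc]
        exact hv
      · rw [pair_sublist_range_rev]
        exact ⟨him, hmR⟩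
  · rw [body3]
    exact shapeEq_trans
      (sweep_shape grid _ _ 3 ((List.range grid.length).reverse) (res, false)) hsh

-- the full B pipeline, pointwise
theorem alt_cell (grid : List (List Int))
    (hPre : ∀ r, r < grid.length → (grid.getD 0 []).length ≤ (grid.getD r []).length) :
    (∀ i j, gA (transform_alt grid) i j =
      (if gA grid i j = 0 ∧ j < (grid.getD 0 []).length ∧
          (∃ m ∈ List.range grid.length, i < m ∧ gA grid m j = 3) then 3
       else if gA grid i j = 0 ∧ i < grid.length ∧ j < (grid.getD 0 []).length ∧
          (∃ c' ∈ List.range (grid.getD 0 []).length, c' < j ∧ gA grid i c' = 1) then 1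
       else if gA grid i j = 0 ∧ j < (grid.getD 0 []).length ∧
          j = (grid.getD 0 []).length / 2 ∧
          (∃ m ∈ List.range grid.length, m < i ∧ i < grid.length ∧ gA grid m j = 2) then 2
       else gA grid i j))
      ∧ ShapeEq (transform_alt grid) grid := by
  have h2 := passes_fold grid 2 (body2 grid grid.length ((grid.getD 0 []).length / 2))
    (fun c => c < (grid.getD 0 []).length)
    (fun c i j => gB grid i j = 0 ∧ j = c ∧ j = (grid.getD 0 []).length / 2 ∧
      ∃ m ∈ List.range grid.length, m < i ∧ i < grid.length ∧ gB grid m j = 2)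
    (fun res c hc hsh => body2_spec grid hPre res c hc hsh)
    (List.range (grid.getD 0 []).length) grid
    (fun c hc => List.mem_range.1 hc) (shapeEq_refl grid)
  obtain ⟨h2c, h2s⟩ := h2
  have h1 := passes_fold grid 1 (body1 grid (grid.getD 0 []).length)
    (fun r => r < grid.length)
    (fun r i j => gB grid i j = 0 ∧ i = r ∧ j < (grid.getD 0 []).length ∧
      ∃ c' ∈ List.range (grid.getD 0 []).length, c' < j ∧ gB grid i c' = 1)
    (fun res r hr hsh => body1_spec grid hPre res r hr hsh)
    (List.range grid.length) _
    (fun r hr => List.mem_range.1 hr) h2s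
  obtain ⟨h1c, h1s⟩ := h1
  have h3 := passes_fold grid 3 (body3 grid grid.length)
    (fun c => c < (grid.getD 0 []).length)
    (fun c i j => gB grid i j = 0 ∧ j = c ∧
      ∃ m ∈ List.range grid.length, i < m ∧ gB grid m j = 3)
    (fun res c hc hsh => body3_spec grid hPre res c hc hsh)
    (List.range (grid.getD 0 []).length) _
    (fun c hc => List.mem_range.1 hc) h1s
  obtain ⟨h3c, h3s⟩ := h3
  rw [← alt_eq_passes] at h3c h3s
  simp only [gB_eq_gA] at h3c h1c h2c
  refine ⟨fun i j => ?_, h3s⟩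
  have q3 : (∃ c ∈ List.range (grid.getD 0 []).length, gA grid i j = 0 ∧ j = c ∧
        ∃ m ∈ List.range grid.length, i < m ∧ gA grid m j = 3)
      ↔ (gA grid i j = 0 ∧ j < (grid.getD 0 []).length ∧
        (∃ m ∈ List.range grid.length, i < m ∧ gA grid m j = 3)) := by
    constructor
    · rintro ⟨c, hc, h0, rfl, hex⟩
      exact ⟨h0, List.mem_range.1 hc, hex⟩
    · rintro ⟨h0, hj, hex⟩
      exact ⟨j, List.mem_range.2 hj, h0, rfl, hex⟩
  have q1 : (∃ r ∈ List.range grid.length, gA grid i j = 0 ∧ i = r ∧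
        j < (grid.getD 0 []).length ∧
        ∃ c' ∈ List.range (grid.getD 0 []).length, c' < j ∧ gA grid i c' = 1)
      ↔ (gA grid i j = 0 ∧ i < grid.length ∧ j < (grid.getD 0 []).length ∧
        (∃ c' ∈ List.range (grid.getD 0 []).length, c' < j ∧ gA grid i c' = 1)) := by
    constructor
    · rintro ⟨r, hr, h0, rfl, hj, hex⟩
      exact ⟨h0, List.mem_range.1 hr, hj, hex⟩
    · rintro ⟨h0, hi, hj, hex⟩
      exact ⟨i, List.mem_range.2 hi, h0, rfl, hj, hex⟩
  have q2 : (∃ c ∈ List.range (grid.getD 0 []).length, gA grid i j = 0 ∧ j = c ∧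
        j = (grid.getD 0 []).length / 2 ∧
        ∃ m ∈ List.range grid.length, m < i ∧ i < grid.length ∧ gA grid m j = 2)
      ↔ (gA grid i j = 0 ∧ j < (grid.getD 0 []).length ∧
        j = (grid.getD 0 []).length / 2 ∧
        (∃ m ∈ List.range grid.length, m < i ∧ i < grid.length ∧ gA grid m j = 2)) := by
    constructor
    · rintro ⟨c, hc, h0, rfl, hex⟩
      exact ⟨h0, List.mem_range.1 hc, hex⟩
    · rintro ⟨h0, hj, hex⟩
      exact ⟨j, List.mem_range.2 hj, h0, rfl, hex⟩
  rw [h3c i j, h1c i j, h2c i j]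
  simp only [q3, q1, q2]

-- extensionality for grids via gA
theorem list2_ext (x y : List (List Int)) (hlen : x.length = y.length)
    (hrow : ∀ r, r < x.length → (x.getD r []).length = (y.getD r []).length)
    (hval : ∀ r j, r < x.length → j < (x.getD r []).length → gA x r j = gA y r j) :
    x = y := by
  apply List.ext_getElem hlen
  intro r h1 h2
  apply List.ext_getElem
  · have := hrow r h1
    rw [List.getD_eq_getElem _ _ h1, List.getD_eq_getElem _ _ h2] at this
    exact this
  · intro j hj1 hj2
    have := hval r j h1 (by rw [List.getD_eq_getElem _ _ h1]; exact hj1)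
    unfold gA at this
    rw [List.getD_eq_getElem _ _ h1, List.getD_eq_getElem _ _ h2,
      List.getD_eq_getElem _ _ hj1, List.getD_eq_getElem _ _ hj2] at this
    exact this

-- ===== VERDICT (by name: the statement is the Claim_ definition above) =====
theorem transform_spec : Claim_equal_transform := by
  unfold Claim_equal_transform
  intro grid _ hpre
  unfold Spec_transform
  obtain ⟨hne, hrows⟩ := hpre
  have hPre' : ∀ r, r < grid.length → (grid.getD 0 []).length ≤ (grid.getD r []).length := by
    intro r hr
    refine hrows _ ?_
    rw [List.getD_eq_getElem _ _ hr]
    exact List.getElem_mem hr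
  obtain ⟨hval, hshape⟩ := foldl_step_gA grid grid.length (grid.getD 0 []).length rfl hPre'
    (pairs grid.length (grid.getD 0 []).length) [] grid
    (fun p hp => (mem_pairs _ _ p).1 hp)
    (fun p _ q hq => absurd hq List.not_mem_nil)
    (pairwise_pairs _ _) (shapeEq_refl grid)
    (fun i j => by rw [V_nil])
  rw [List.nil_append] at hval
  obtain ⟨haltc, haltsh⟩ := alt_cell grid hPre'
  rw [transform_eq_foldl_pairs]
  apply list2_ext
  · rw [hshape.1, haltsh.1]
  · intro r hrl
    rw [hshape.2 r, haltsh.2 r]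
  · intro r j hrl hjl
    rw [hshape.1] at hrl
    rw [hshape.2 r] at hjl
    rw [hval r j, haltc r j]
    by_cases hj : j < (grid.getD 0 []).length
    · rw [V_pairs_cell grid r j]
    · rw [V_pairs_ge grid grid.length _ r j (by omega)]
      rw [if_neg (fun h => by omega), if_neg (by rintro ⟨-, -, hj', -⟩; omega),
        if_neg (fun h => by omega)]
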